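-- pv_equiv track=rewrite | github.com/szkript/PokerAssistant | utils.py | calculate_card_positions
-- ===== SOURCE A (Python) =====
-- def calculate_card_positions(pos, pos1):
--     poscalc = []
--     margin = 4
--
--     tmp = pos.copy()
--     for i in range(2):
--         tmp = tmp.copy()
--         if i > 0:
--             tmp["x"] = tmp["x"] + tmp["w"]
--         poscalc.append(tmp)
--
--     tmp = pos1.copy()
--     for x in range(5):
--         tmp = tmp.copy()
--         if x > 0:
--             tmp["x"] += tmp["w"] + margin
--         poscalc.append(tmp)
--     return poscalc
-- ===== SOURCE B (Python) =====
-- def calculate_card_positions(pos, pos1):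
--     def at_offset(d, dx):
--         c = d.copy()
--         c["x"] = d["x"] + dx
--         return c
--     return [at_offset(pos, i * pos["w"]) for i in range(2)] + \
--            [at_offset(pos1, i * (pos1["w"] + 4)) for i in range(5)]
-- ===== Notes on version B (the rewrite author's own statement) =====
-- stated objective: simpler
-- what changed: Replaces A's threaded running-copy accumulator (each entry mutated from the previous copy) with a direct closed-form offset per element: entry i is an independent copy of the base dict with x = base_x + i*step.
import Mathlib
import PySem

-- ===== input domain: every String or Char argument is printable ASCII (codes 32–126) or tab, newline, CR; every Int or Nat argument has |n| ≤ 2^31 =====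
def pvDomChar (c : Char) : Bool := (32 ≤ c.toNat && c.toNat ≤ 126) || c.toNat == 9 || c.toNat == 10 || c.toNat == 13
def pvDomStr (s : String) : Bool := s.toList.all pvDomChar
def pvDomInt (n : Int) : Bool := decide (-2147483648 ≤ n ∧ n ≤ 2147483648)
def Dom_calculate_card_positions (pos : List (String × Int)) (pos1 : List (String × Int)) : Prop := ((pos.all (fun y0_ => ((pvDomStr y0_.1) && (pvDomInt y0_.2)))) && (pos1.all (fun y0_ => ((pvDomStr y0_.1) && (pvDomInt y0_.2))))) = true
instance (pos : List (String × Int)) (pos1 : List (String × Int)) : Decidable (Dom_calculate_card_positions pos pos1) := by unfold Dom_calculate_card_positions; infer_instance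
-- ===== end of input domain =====

-- B builds each entry directly as an independent copy of the base dict with a closed-form x offset,
-- instead of A's running-copy chain threaded through the loops. Objective: simpler.


-- ===== PORT A =====
-- tmp["x"] = tmp["x"] + tmp["w"] + m  (m = 0 in the first loop, m = margin = 4 in the second);
-- the fallthrough branch is Python's KeyError, excluded by Pre_.
def aBump (d : PySem.Dict String Int) (m : Int) : PySem.Dict String Int :=
  match d.get? "x", d.get? "w" with
  | some x, some w => d.insert "x" (x + w + m)
  | _, _ => d

def calculate_card_positions (pos : List (String × Int)) (pos1 : List (String × Int)) : List (List (String × Int)) :=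
  let s1 := (PySem.List.pyRange 0 2 1).foldl
    (fun (st : PySem.Dict String Int × List (List (String × Int))) i =>
      let tmp := if i > 0 then aBump st.1 0 else st.1
      (tmp, st.2 ++ [tmp.items]))
    (PySem.Dict.ofList pos, [])
  let s2 := (PySem.List.pyRange 0 5 1).foldl
    (fun (st : PySem.Dict String Int × List (List (String × Int))) x =>
      let tmp := if x > 0 then aBump st.1 4 else st.1
      (tmp, st.2 ++ [tmp.items]))
    (PySem.Dict.ofList pos1, s1.2)
  s2.2

-- ===== PORT B =====
-- [at_offset(d, i*(d["w"]+margin)) for i in range(n)]: d["x"], d["w"] looked up once;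
-- the fallthrough branch is Python's KeyError, excluded by Pre_.
def altRow (d : PySem.Dict String Int) (n : Int) (margin : Int) : List (List (String × Int)) :=
  match d.get? "x", d.get? "w" with
  | some x, some w => (PySem.List.pyRange 0 n 1).map (fun i => (d.insert "x" (x + i * (w + margin))).items)
  | _, _ => []

def calculate_card_positions_alt (pos : List (String × Int)) (pos1 : List (String × Int)) : List (List (String × Int)) :=
  altRow (PySem.Dict.ofList pos) 2 0 ++ altRow (PySem.Dict.ofList pos1) 5 4

-- ===== PRECONDITION & SPEC =====
-- Pre_ excludes inputs whose dicts lack an "x" or "w" key: Python A raises KeyError there (and B does too).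
def Pre_calculate_card_positions (pos : List (String × Int)) (pos1 : List (String × Int)) : Prop :=
  "x" ∈ pos.map Prod.fst ∧ "w" ∈ pos.map Prod.fst ∧ "x" ∈ pos1.map Prod.fst ∧ "w" ∈ pos1.map Prod.fst
instance (pos : List (String × Int)) (pos1 : List (String × Int)) : Decidable (Pre_calculate_card_positions pos pos1) := by unfold Pre_calculate_card_positions; infer_instance

def pvWitness_calculate_card_positions : (List (String × Int)) × (List (String × Int)) :=
  ([("x", 1), ("w", 3), ("h", 9)], [("x", 10), ("w", 2)])

def Spec_calculate_card_positions (pos : List (String × Int)) (pos1 : List (String × Int)) (out : List (List (String × Int))) : Prop := out = calculate_card_positions_alt pos pos1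
instance (pos : List (String × Int)) (pos1 : List (String × Int)) (out : List (List (String × Int))) : Decidable (Spec_calculate_card_positions pos pos1 out) := by unfold Spec_calculate_card_positions; infer_instance

-- ===== CLAIM (what is proved, stated in full; the proofs are below) =====
def Claim_equal_calculate_card_positions : Prop := ∀ (pos : List (String × Int)) (pos1 : List (String × Int)), Dom_calculate_card_positions pos pos1 → Pre_calculate_card_positions pos pos1 → Spec_calculate_card_positions pos pos1 (calculate_card_positions pos pos1)

-- ===== LEMMAS AND PROOFS =====

-- a key occurring among the input pairs has a value in the built dict
lemma get?_ofList_isSome (l : List (String × Int)) (k : String) (h : k ∈ l.map Prod.fst) :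
    ∃ v, (PySem.Dict.ofList l).get? k = some v := by
  have hk : k ∈ (PySem.Dict.ofList l).keys := by
    show k ∈ (PySem.Dict.empty.update l).keys
    unfold PySem.Dict.update
    rw [PySem.Dict.keys_foldl_insert_key]
    simpa [PySem.Set.mem_update] using h
  cases hv : (PySem.Dict.ofList l).get? k with
  | none => exact absurd ((PySem.Dict.get?_eq_none_iff_not_mem_keys _ _).mp hv) (by simpa using hk)
  | some v => exact ⟨v, rfl⟩

-- re-inserting the value a key already has leaves the items list unchanged (needs unique keys)
lemma items_insert_self (d : PySem.Dict String Int) (k : String) (v : Int)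
    (hnd : d.keys.Nodup) (h : d.get? k = some v) : (d.insert k v).items = d.items := by
  have hc : d.contains k = true := by rw [PySem.Dict.contains_eq_isSome_get?, h]; rfl
  rw [PySem.Dict.items_insert_of_contains d v hc]
  conv_rhs => rw [← List.map_id d.items]
  apply List.map_congr_left
  intro p hp
  by_cases hpk : p.1 = k
  · have hm : (p.1, p.2) ∈ d.items := by simpa using hp
    have := PySem.Dict.get?_of_mem_items d hm hnd
    rw [hpk, h] at this
    injection this with h2
    simp [Prod.ext_iff, hpk, h2]
  · simp [hpk]

-- ===== VERDICT (by name: the statement is the Claim_ definition above) =====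
theorem calculate_card_positions_spec : Claim_equal_calculate_card_positions := by
  intro pos pos1 _ ⟨h1, h2, h3, h4⟩
  show calculate_card_positions pos pos1 = calculate_card_positions_alt pos pos1
  obtain ⟨x, hx⟩ := get?_ofList_isSome pos "x" h1
  obtain ⟨w, hw⟩ := get?_ofList_isSome pos "w" h2
  obtain ⟨x1, hx1⟩ := get?_ofList_isSome pos1 "x" h3
  obtain ⟨w1, hw1⟩ := get?_ofList_isSome pos1 "w" h4
  have hr2 : PySem.List.pyRange 0 2 1 = [0, 1] := by decide
  have hr5 : PySem.List.pyRange 0 5 1 = [0, 1, 2, 3, 4] := by decide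
  have hwx : ("w" : String) ≠ "x" := by decide
  simp only [calculate_card_positions, calculate_card_positions_alt, altRow, aBump, hr2, hr5,
    List.foldl, List.map, hx, hw, hx1, hw1]
  norm_num
  simp only [PySem.Dict.get?_insert_self, PySem.Dict.get?_insert_of_ne _ _ hwx,
    hx1, hw1, PySem.Dict.insert_insert_self]
  refine ⟨(items_insert_self _ _ _ (PySem.Dict.nodup_keys_ofList pos) hx).symm,
    by simp [hx, hw], (items_insert_self _ _ _ (PySem.Dict.nodup_keys_ofList pos1) hx1).symm,
    ?_, ?_, ?_, ?_⟩ <;> ring_nf
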